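-- pv_equiv track=rewrite | github.com/dokerbolov/webdev | week8/codingbat/String-1/extra_end.py | extra_end
-- ===== SOURCE A (Python) =====
-- def extra_end(str):
--     newstr = ""
--     if (len(str) < 3):
--         return str + str + str
--     else:
--         for j in range(0, 3):
--             for i in range(len(str) - 2, len(str)):
--                 newstr = newstr + str[i]
--     return newstr
-- ===== SOURCE B (Python) =====
-- def extra_end(str):
--     return str[-2:] * 3
-- ===== Notes on version B (the rewrite author's own statement) =====
-- stated objective: simpler
-- what changed: Replaces the length-3 branch and the two nested index loops with the single closed-form expression str[-2:] * 3, relying on Python slice clamping for short strings.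
import Mathlib
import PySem

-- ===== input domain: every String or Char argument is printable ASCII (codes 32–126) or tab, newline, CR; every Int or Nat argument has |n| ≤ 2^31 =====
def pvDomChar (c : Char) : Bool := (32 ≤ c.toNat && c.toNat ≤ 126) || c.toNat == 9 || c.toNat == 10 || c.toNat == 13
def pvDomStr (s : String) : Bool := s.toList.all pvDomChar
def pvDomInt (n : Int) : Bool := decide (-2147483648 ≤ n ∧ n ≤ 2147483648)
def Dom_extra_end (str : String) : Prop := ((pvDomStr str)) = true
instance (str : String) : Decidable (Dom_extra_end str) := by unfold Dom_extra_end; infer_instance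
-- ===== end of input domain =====

-- B replaces A's length branch and nested index loops with the closed form str[-2:] * 3 (objective: simpler).
-- ===== PORT A =====
-- literal port of A: the len<3 branch returns str+str+str; otherwise two nested
-- index loops append the last two characters three times (accumulator = List Char).
def extra_end (str : String) : String :=
  let s := str.toList
  if PySem.Str.len str < 3 then String.ofList (s ++ s ++ s)
  else
    String.ofList
      ((PySem.List.pyRange 0 3 1).foldl (fun acc _ =>
        (PySem.List.pyRange (PySem.Str.len str - 2) (PySem.Str.len str) 1).foldl
          (fun acc2 i => acc2 ++ [PySem.List.pyGetD s i ' ']) acc) [])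

-- ===== PORT B =====
-- B is the closed form `str[-2:] * 3`: one slice, repeated three times; no branch, no loop.
def extra_end_alt (str : String) : String :=
  let t := PySem.List.slice str.toList (some (-2)) none
  String.ofList (t ++ t ++ t)

-- ===== PRECONDITION & SPEC =====
def Spec_extra_end (str : String) (out : String) : Prop := out = extra_end_alt str
instance (str : String) (out : String) : Decidable (Spec_extra_end str out) := by unfold Spec_extra_end; infer_instance

-- ===== CLAIM (what is proved, stated in full; the proofs are below) =====
def Claim_equal_extra_end : Prop := ∀ (str : String), Dom_extra_end str → Spec_extra_end str (extra_end str)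

-- ===== LEMMAS AND PROOFS =====

-- ===== VERDICT (by name: the statement is the Claim_ definition above) =====
theorem extra_end_spec : Claim_equal_extra_end := by
  intro str _
  unfold Spec_extra_end extra_end extra_end_alt
  have hL : PySem.List.len str.toList = (str.toList.length : Int) := PySem.List.len_eq _
  have hStr : PySem.Str.len str = (str.toList.length : Int) := by
    simp [PySem.Str.len_eq]
  have hsl : PySem.List.slice str.toList (some (-2)) none
      = str.toList.drop (str.toList.length - 2) :=
    PySem.List.slice_from_neg_ofNat str.toList 2 (by omega)
  by_cases h : PySem.Str.len str < 3
  · have hlen : str.toList.length < 3 := by omega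
    have h0 : str.toList.length - 2 = 0 := by omega
    simp only [if_pos h, hsl, h0, List.drop_zero]
  · have hlen : 3 ≤ str.toList.length := by omega
    have hin : ∀ acc : List Char,
        (PySem.List.pyRange (PySem.Str.len str - 2) (PySem.Str.len str) 1).foldl
          (fun acc2 i => acc2 ++ [PySem.List.pyGetD str.toList i ' ']) acc
        = acc ++ str.toList.drop (str.toList.length - 2) := by
      intro acc
      rw [hStr, ← hL,
        PySem.List.foldl_pyRange_pyGetD str.toList ' '
          (fun acc2 c => acc2 ++ [c]) acc (by rw [hL]; omega)]
      have h2 : ((PySem.List.len str.toList - 2 : Int)).toNat = str.toList.length - 2 := by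
        rw [hL]; omega
      rw [h2, PySem.List.foldl_append_singleton_eq_self]
    have hr3 : PySem.List.pyRange 0 3 1 = [0, 1, 2] := by decide
    simp only [if_neg h, hr3, List.foldl, hin, hsl, List.nil_append, List.append_assoc]
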